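-- pv_equiv track=rewrite | github.com/aws/sagemaker-hyperpod-recipes | launcher/recipe_templatization/base_recipe_template_processor.py | format_sequence_length
-- ===== SOURCE A (Python) =====
-- def format_sequence_length(seq_length: int) -> str:
--     """
--     Format integer sequence length to string format.
--     Rounds down to the nearest valid sequence length if exact match not found.
--
--     Args:
--         seq_length: Integer sequence length (e.g., 1024, 4096, 16384, 10240)
--
--     Returns:
--         Formatted sequence length string (e.g., "1K", "4K", "8K")
--         One of: "1K" | "2K" | "4K" | "8K" | "16K" | "32K" | "64K" | "128K"
--
--     Examples:
--         1024 -> "1K"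
--         4096 -> "4K"
--         10240 -> "8K" (rounded down)
--         16384 -> "16K"
--         100000 -> "64K" (rounded down)
--     """
--     # Valid sequence lengths mapping
--     valid_lengths = {
--         1024: "1K",
--         2048: "2K",
--         4096: "4K",
--         8192: "8K",
--         16384: "16K",
--         32768: "32K",
--         65536: "64K",
--         131072: "128K",
--     }
--
--     # If exact match, return it
--     if seq_length in valid_lengths:
--         return valid_lengths[seq_length]
--
--     # Otherwise, round down to the nearest valid length
--     sorted_lengths = sorted(valid_lengths.keys())
--
--     # Find the largest valid length that is less than seq_length
--     for length in reversed(sorted_lengths):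
--         if seq_length > length:
--             return valid_lengths[length]
--
--     # If smaller than all valid lengths, return the minimum
--     return valid_lengths[sorted_lengths[0]]
-- ===== SOURCE B (Python) =====
-- def format_sequence_length(seq_length: int) -> str:
--     """Closed-form arithmetic version: no table, no scan."""
--     k = seq_length // 1024
--     if k < 1:
--         return "1K"
--     p = min(1 << (k.bit_length() - 1), 128)
--     return f"{p}K"
-- ===== Notes on version B (the rewrite author's own statement) =====
-- stated objective: simpler
-- what changed: Replaces A's 8-entry dict, exact-match lookup, sorted(keys) and reversed linear scan with a closed-form computation: k = seq_length // 1024, floor power of two via k.bit_length(), clamped to [1, 128].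
import Mathlib
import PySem

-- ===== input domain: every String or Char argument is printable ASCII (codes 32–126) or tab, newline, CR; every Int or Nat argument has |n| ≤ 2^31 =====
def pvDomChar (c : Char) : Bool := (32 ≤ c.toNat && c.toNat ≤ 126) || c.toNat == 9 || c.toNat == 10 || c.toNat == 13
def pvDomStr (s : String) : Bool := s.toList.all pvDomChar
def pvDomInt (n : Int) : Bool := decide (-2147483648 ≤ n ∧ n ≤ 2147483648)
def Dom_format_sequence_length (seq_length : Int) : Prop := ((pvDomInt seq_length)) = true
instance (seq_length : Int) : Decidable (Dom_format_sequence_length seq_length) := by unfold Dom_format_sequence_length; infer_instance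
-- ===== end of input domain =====

-- B replaces A's table plus reversed linear scan by a closed-form bit_length computation; objective: simpler.

-- ===== PORT A =====
-- the literal dict `valid_lengths` of A (hoisted; A rebuilds the same literal on every call)
def pvValidLengths : PySem.Dict Int String := PySem.Dict.ofList
  [(1024, "1K"), (2048, "2K"), (4096, "4K"), (8192, "8K"),
   (16384, "16K"), (32768, "32K"), (65536, "64K"), (131072, "128K")]

def format_sequence_length (seq_length : Int) : String :=
  -- `if seq_length in valid_lengths: return valid_lengths[seq_length]`
  match pvValidLengths.get? seq_length with
  | some v => v
  | none =>
    -- `sorted_lengths = sorted(valid_lengths.keys())`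
    let sorted_lengths := PySem.List.sorted pvValidLengths.keys (fun x => x) false
    -- `for length in reversed(sorted_lengths): if seq_length > length: return valid_lengths[length]`
    match sorted_lengths.reverse.find? (fun length => decide (length < seq_length)) with
    | some length => (pvValidLengths.get? length).getD ""   -- key always present: getD never hits the default
    | none => (pvValidLengths.get? (PySem.List.pyGetD sorted_lengths 0 0)).getD ""  -- list nonempty, key present

-- ===== PORT B =====
def format_sequence_length_alt (seq_length : Int) : String :=
  let k := PySem.Int.floordiv seq_length 1024
  if k < 1 then "1K"
  else
    let p : Int := min ((1:Int) <<< (PySem.Int.bitLength k - 1)) 128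
    PySem.Int.toStr p ++ "K"

-- ===== PRECONDITION & SPEC =====
def Spec_format_sequence_length (seq_length : Int) (out : String) : Prop := out = format_sequence_length_alt seq_length
instance (seq_length : Int) (out : String) : Decidable (Spec_format_sequence_length seq_length out) := by unfold Spec_format_sequence_length; infer_instance

-- ===== CLAIM (what is proved, stated in full; the proofs are below) =====
def Claim_equal_format_sequence_length : Prop := ∀ (seq_length : Int), Dom_format_sequence_length seq_length → Spec_format_sequence_length seq_length (format_sequence_length seq_length)

-- ===== LEMMAS AND PROOFS =====

lemma pvGet?_none (n : Int) (h : n ∉ ([1024, 2048, 4096, 8192, 16384, 32768, 65536, 131072] : List Int)) :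
    pvValidLengths.get? n = none := by
  have hv : pvValidLengths = PySem.Dict.mk [(1024, "1K"), (2048, "2K"), (4096, "4K"), (8192, "8K"),
      (16384, "16K"), (32768, "32K"), (65536, "64K"), (131072, "128K")] := by decide
  simp only [List.mem_cons, not_or] at h
  rw [hv]
  simp only [PySem.Dict.get?_mk_cons, beq_iff_eq]
  repeat rw [if_neg (by omega)]
  simp [PySem.Dict.get?]

lemma pvSortedKeys : PySem.List.sorted pvValidLengths.keys (fun x => x) false
    = [1024, 2048, 4096, 8192, 16384, 32768, 65536, 131072] := by decide

lemma pvA_low (n : Int) (h : n < 1024) : format_sequence_length n = "1K" := by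
  unfold format_sequence_length
  rw [pvGet?_none n (by simp; omega)]
  simp only [pvSortedKeys, List.reverse_cons, List.reverse_nil, List.nil_append, List.cons_append,
    List.find?]
  rw [show (decide ((131072:Int) < n)) = false by simp; omega,
      show (decide ((65536:Int) < n)) = false by simp; omega,
      show (decide ((32768:Int) < n)) = false by simp; omega,
      show (decide ((16384:Int) < n)) = false by simp; omega,
      show (decide ((8192:Int) < n)) = false by simp; omega,
      show (decide ((4096:Int) < n)) = false by simp; omega,
      show (decide ((2048:Int) < n)) = false by simp; omega,
      show (decide ((1024:Int) < n)) = false by simp; omega]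
  rfl

lemma pvA_high (n : Int) (h : 131072 ≤ n) : format_sequence_length n = "128K" := by
  by_cases hn : n = 131072
  · subst hn; rfl
  unfold format_sequence_length
  rw [pvGet?_none n (by simp; omega)]
  simp only [pvSortedKeys, List.reverse_cons, List.reverse_nil, List.nil_append, List.cons_append,
    List.find?]
  rw [show (decide ((131072:Int) < n)) = true by simp; omega]
  rfl

lemma pvA_mid0 (n : Int) (h1 : 1024 ≤ n) (h2 : n < 2048) : format_sequence_length n = "1K" := by
  by_cases hn : n = 1024
  · subst hn; rfl
  unfold format_sequence_length
  rw [pvGet?_none n (by simp; omega)]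
  simp only [pvSortedKeys, List.reverse_cons, List.reverse_nil, List.nil_append, List.cons_append,
    List.find?]
  rw [show (decide ((131072:Int) < n)) = false by simp; omega,
      show (decide ((65536:Int) < n)) = false by simp; omega,
      show (decide ((32768:Int) < n)) = false by simp; omega,
      show (decide ((16384:Int) < n)) = false by simp; omega,
      show (decide ((8192:Int) < n)) = false by simp; omega,
      show (decide ((4096:Int) < n)) = false by simp; omega,
      show (decide ((2048:Int) < n)) = false by simp; omega,
      show (decide ((1024:Int) < n)) = true by simp; omega]
  rfl

lemma pvA_mid1 (n : Int) (h1 : 2048 ≤ n) (h2 : n < 4096) : format_sequence_length n = "2K" := by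
  by_cases hn : n = 2048
  · subst hn; rfl
  unfold format_sequence_length
  rw [pvGet?_none n (by simp; omega)]
  simp only [pvSortedKeys, List.reverse_cons, List.reverse_nil, List.nil_append, List.cons_append,
    List.find?]
  rw [show (decide ((131072:Int) < n)) = false by simp; omega,
      show (decide ((65536:Int) < n)) = false by simp; omega,
      show (decide ((32768:Int) < n)) = false by simp; omega,
      show (decide ((16384:Int) < n)) = false by simp; omega,
      show (decide ((8192:Int) < n)) = false by simp; omega,
      show (decide ((4096:Int) < n)) = false by simp; omega,
      show (decide ((2048:Int) < n)) = true by simp; omega]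
  rfl

lemma pvA_mid2 (n : Int) (h1 : 4096 ≤ n) (h2 : n < 8192) : format_sequence_length n = "4K" := by
  by_cases hn : n = 4096
  · subst hn; rfl
  unfold format_sequence_length
  rw [pvGet?_none n (by simp; omega)]
  simp only [pvSortedKeys, List.reverse_cons, List.reverse_nil, List.nil_append, List.cons_append,
    List.find?]
  rw [show (decide ((131072:Int) < n)) = false by simp; omega,
      show (decide ((65536:Int) < n)) = false by simp; omega,
      show (decide ((32768:Int) < n)) = false by simp; omega,
      show (decide ((16384:Int) < n)) = false by simp; omega,
      show (decide ((8192:Int) < n)) = false by simp; omega,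
      show (decide ((4096:Int) < n)) = true by simp; omega]
  rfl

lemma pvA_mid3 (n : Int) (h1 : 8192 ≤ n) (h2 : n < 16384) : format_sequence_length n = "8K" := by
  by_cases hn : n = 8192
  · subst hn; rfl
  unfold format_sequence_length
  rw [pvGet?_none n (by simp; omega)]
  simp only [pvSortedKeys, List.reverse_cons, List.reverse_nil, List.nil_append, List.cons_append,
    List.find?]
  rw [show (decide ((131072:Int) < n)) = false by simp; omega,
      show (decide ((65536:Int) < n)) = false by simp; omega,
      show (decide ((32768:Int) < n)) = false by simp; omega,
      show (decide ((16384:Int) < n)) = false by simp; omega,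
      show (decide ((8192:Int) < n)) = true by simp; omega]
  rfl

lemma pvA_mid4 (n : Int) (h1 : 16384 ≤ n) (h2 : n < 32768) : format_sequence_length n = "16K" := by
  by_cases hn : n = 16384
  · subst hn; rfl
  unfold format_sequence_length
  rw [pvGet?_none n (by simp; omega)]
  simp only [pvSortedKeys, List.reverse_cons, List.reverse_nil, List.nil_append, List.cons_append,
    List.find?]
  rw [show (decide ((131072:Int) < n)) = false by simp; omega,
      show (decide ((65536:Int) < n)) = false by simp; omega,
      show (decide ((32768:Int) < n)) = false by simp; omega,
      show (decide ((16384:Int) < n)) = true by simp; omega]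
  rfl

lemma pvA_mid5 (n : Int) (h1 : 32768 ≤ n) (h2 : n < 65536) : format_sequence_length n = "32K" := by
  by_cases hn : n = 32768
  · subst hn; rfl
  unfold format_sequence_length
  rw [pvGet?_none n (by simp; omega)]
  simp only [pvSortedKeys, List.reverse_cons, List.reverse_nil, List.nil_append, List.cons_append,
    List.find?]
  rw [show (decide ((131072:Int) < n)) = false by simp; omega,
      show (decide ((65536:Int) < n)) = false by simp; omega,
      show (decide ((32768:Int) < n)) = true by simp; omega]
  rfl

lemma pvA_mid6 (n : Int) (h1 : 65536 ≤ n) (h2 : n < 131072) : format_sequence_length n = "64K" := by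
  by_cases hn : n = 65536
  · subst hn; rfl
  unfold format_sequence_length
  rw [pvGet?_none n (by simp; omega)]
  simp only [pvSortedKeys, List.reverse_cons, List.reverse_nil, List.nil_append, List.cons_append,
    List.find?]
  rw [show (decide ((131072:Int) < n)) = false by simp; omega,
      show (decide ((65536:Int) < n)) = true by simp; omega]
  rfl

-- 2^j ≤ k < 2^(j+1) pins Python's k.bit_length() to j+1
lemma pvBitLength_eq (k : Int) (j : Nat) (h1 : (2:Int) ^ j ≤ k) (h2 : k < 2 ^ (j + 1)) :
    PySem.Int.bitLength k = j + 1 := by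
  have hpos : (0:Int) < k := lt_of_lt_of_le (by positivity) h1
  have habs : (k.natAbs : Int) = k := Int.natAbs_of_nonneg hpos.le
  have h1' : 2 ^ j ≤ k.natAbs := by rw [← habs] at h1; exact_mod_cast h1
  have h2' : k.natAbs < 2 ^ (j + 1) := by rw [← habs] at h2; exact_mod_cast h2
  have hub := PySem.Int.lt_two_pow_bitLength k
  have hlb := PySem.Int.two_pow_bitLength_le k (by omega)
  have hA : PySem.Int.bitLength k - 1 < j + 1 :=
    (Nat.pow_lt_pow_iff_right (by norm_num)).mp (lt_of_le_of_lt hlb h2')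
  have hB : j < PySem.Int.bitLength k :=
    (Nat.pow_lt_pow_iff_right (by norm_num)).mp (lt_of_le_of_lt h1' hub)
  omega

lemma pvAlt_unfold (n : Int) : format_sequence_length_alt n =
    (if PySem.Int.floordiv n 1024 < 1 then "1K"
     else PySem.Int.toStr (min ((1:Int) <<< (PySem.Int.bitLength (PySem.Int.floordiv n 1024) - 1)) 128) ++ "K") := rfl

lemma pvAlt_low (n : Int) (h : n < 1024) : format_sequence_length_alt n = "1K" := by
  rw [pvAlt_unfold, if_pos]
  rw [PySem.Int.floordiv_lt_iff_lt_mul (by norm_num)]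
  omega

lemma pvAlt_mid (n : Int) (j : Nat) (hj : j ≤ 6)
    (h1 : 1024 * 2 ^ j ≤ n) (h2 : n < 1024 * 2 ^ (j + 1)) :
    format_sequence_length_alt n = PySem.Int.toStr ((2:Int) ^ j) ++ "K" := by
  have hk1 : (2:Int) ^ j ≤ PySem.Int.floordiv n 1024 :=
    (PySem.Int.le_floordiv_iff_mul_le (by norm_num)).mpr (by linarith)
  have hk2 : PySem.Int.floordiv n 1024 < 2 ^ (j + 1) :=
    (PySem.Int.floordiv_lt_iff_lt_mul (by norm_num)).mpr (by linarith)
  have hone : (1:Int) ≤ 2 ^ j := one_le_pow₀ (by norm_num)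
  rw [pvAlt_unfold, if_neg (by omega), pvBitLength_eq _ j hk1 hk2]
  have hmin : min ((1:Int) <<< (j + 1 - 1)) 128 = 2 ^ j := by
    rw [Nat.add_sub_cancel, Int.shiftLeft_eq, one_mul]
    refine min_eq_left ?_
    calc (2:Int) ^ j ≤ 2 ^ 6 := pow_le_pow_right₀ (by norm_num) hj
      _ ≤ 128 := by norm_num
  rw [hmin]

lemma pvAlt_high (n : Int) (h : 131072 ≤ n) : format_sequence_length_alt n = "128K" := by
  have hk1 : (128:Int) ≤ PySem.Int.floordiv n 1024 :=
    (PySem.Int.le_floordiv_iff_mul_le (by norm_num)).mpr (by linarith)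
  set k := PySem.Int.floordiv n 1024 with hk
  have habs : (128:Nat) ≤ k.natAbs := by
    have : (k.natAbs : Int) = k := Int.natAbs_of_nonneg (by omega)
    omega
  have hub := PySem.Int.lt_two_pow_bitLength k
  have hbl : 7 < PySem.Int.bitLength k :=
    (Nat.pow_lt_pow_iff_right (by norm_num)).mp
      (lt_of_le_of_lt (by simpa using habs) hub)
  rw [pvAlt_unfold, ← hk, if_neg (by omega)]
  have hmin : min ((1:Int) <<< (PySem.Int.bitLength k - 1)) 128 = 128 := by
    rw [Int.shiftLeft_eq, one_mul]
    refine min_eq_right ?_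
    calc (128:Int) = 2 ^ 7 := by norm_num
      _ ≤ 2 ^ (PySem.Int.bitLength k - 1) := pow_le_pow_right₀ (by norm_num) (by omega)
  rw [hmin]
  decide

-- ===== VERDICT (by name: the statement is the Claim_ definition above) =====
theorem format_sequence_length_spec : Claim_equal_format_sequence_length := by
  intro n _
  unfold Spec_format_sequence_length
  rcases lt_or_ge n 1024 with h | h
  · rw [pvA_low n h, pvAlt_low n h]
  rcases lt_or_ge n 2048 with h2 | h2
  · rw [pvA_mid0 n h h2, pvAlt_mid n 0 (by norm_num) (by norm_num; omega) (by norm_num; omega)]; decide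
  rcases lt_or_ge n 4096 with h3 | h3
  · rw [pvA_mid1 n h2 h3, pvAlt_mid n 1 (by norm_num) (by norm_num; omega) (by norm_num; omega)]; decide
  rcases lt_or_ge n 8192 with h4 | h4
  · rw [pvA_mid2 n h3 h4, pvAlt_mid n 2 (by norm_num) (by norm_num; omega) (by norm_num; omega)]; decide
  rcases lt_or_ge n 16384 with h5 | h5
  · rw [pvA_mid3 n h4 h5, pvAlt_mid n 3 (by norm_num) (by norm_num; omega) (by norm_num; omega)]; decide
  rcases lt_or_ge n 32768 with h6 | h6
  · rw [pvA_mid4 n h5 h6, pvAlt_mid n 4 (by norm_num) (by norm_num; omega) (by norm_num; omega)]; decide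
  rcases lt_or_ge n 65536 with h7 | h7
  · rw [pvA_mid5 n h6 h7, pvAlt_mid n 5 (by norm_num) (by norm_num; omega) (by norm_num; omega)]; decide
  rcases lt_or_ge n 131072 with h8 | h8
  · rw [pvA_mid6 n h7 h8, pvAlt_mid n 6 (by norm_num) (by norm_num; omega) (by norm_num; omega)]; decide
  rw [pvA_high n h8, pvAlt_high n h8]
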